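-- pv_equiv track=rewrite | github.com/beskacz/egx-cnc | egxinfo/egx/egx.py | count_redundant
-- ===== SOURCE A (Python) =====
-- def count_redundant(tokens):
--   pdpu = list()
--   rc = 0
--   for i in range(len(tokens)):
--     if len(tokens[i]) >= 2:
--       if tokens[i][:2] in ('PD', 'PU'):
--         pdpu.append(tokens[i])
--   for i in range(len(pdpu) - 1):
--     if pdpu[i] == pdpu[i+1]:
--       rc += 1
--     if (pdpu[i] == pdpu[i+1][:2]):
--       rc += 1
--   return rc
-- ===== SOURCE B (Python) =====
-- def count_redundant(tokens):
--   rc = 0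
--   prev = None
--   for t in tokens:
--     if len(t) >= 2 and t[:2] in ('PD', 'PU'):
--       if prev is not None:
--         if prev == t:
--           rc += 1
--         if prev == t[:2]:
--           rc += 1
--       prev = t
--   return rc
-- ===== Notes on version B (the rewrite author's own statement) =====
-- stated objective: simpler
-- what changed: Replaces the build-a-pdpu-list pass plus a second index loop over adjacent pairs by one fused traversal that only remembers the previously accepted PD/PU token.
import Mathlib
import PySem

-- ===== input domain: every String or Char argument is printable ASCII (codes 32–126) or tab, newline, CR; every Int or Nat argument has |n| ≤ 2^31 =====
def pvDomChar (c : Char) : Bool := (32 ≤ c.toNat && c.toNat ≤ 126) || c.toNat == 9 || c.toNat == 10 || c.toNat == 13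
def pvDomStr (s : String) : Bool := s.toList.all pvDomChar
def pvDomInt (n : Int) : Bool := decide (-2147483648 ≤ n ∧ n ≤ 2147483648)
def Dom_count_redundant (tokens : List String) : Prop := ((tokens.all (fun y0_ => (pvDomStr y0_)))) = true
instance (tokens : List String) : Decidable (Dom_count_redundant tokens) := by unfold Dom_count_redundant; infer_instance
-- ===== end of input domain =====

-- B fuses A's two passes (collect the PD/PU tokens into a list, then scan its adjacent
-- pairs) into one traversal remembering only the previously accepted token; same cost, simpler.

-- ===== PORT A =====
-- the 'pdpu' list A's first loop builds
def pdpuA (tokens : List String) : List String :=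
  (PySem.List.pyRange 0 (tokens.length : Int) 1).foldl
    (fun pdpu i =>
      if 2 ≤ PySem.Str.len (PySem.List.pyGetD tokens i "") then
        if PySem.Str.slice (PySem.List.pyGetD tokens i "") none (some 2) = "PD" ∨
           PySem.Str.slice (PySem.List.pyGetD tokens i "") none (some 2) = "PU" then
          pdpu ++ [PySem.List.pyGetD tokens i ""]
        else pdpu
      else pdpu) []

def count_redundant (tokens : List String) : Int :=
  (PySem.List.pyRange 0 (((pdpuA tokens).length : Int) - 1) 1).foldl
    (fun rc i =>
      -- the two sequential 'if'...'rc += 1' of A, the first one's rc threaded into the second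
      if PySem.List.pyGetD (pdpuA tokens) i "" =
          PySem.Str.slice (PySem.List.pyGetD (pdpuA tokens) (i + 1) "") none (some 2) then
        (if PySem.List.pyGetD (pdpuA tokens) i "" = PySem.List.pyGetD (pdpuA tokens) (i + 1) ""
          then rc + 1 else rc) + 1
      else
        (if PySem.List.pyGetD (pdpuA tokens) i "" = PySem.List.pyGetD (pdpuA tokens) (i + 1) ""
          then rc + 1 else rc)) 0

-- ===== PORT B =====
def count_redundant_alt (tokens : List String) : Int :=
  (tokens.foldl
    (fun (st : Int × Option String) t =>
      if 2 ≤ PySem.Str.len t ∧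
          (PySem.Str.slice t none (some 2) = "PD" ∨ PySem.Str.slice t none (some 2) = "PU") then
        match st.2 with
        | none => (st.1, some t)
        | some p =>
          (st.1 + (if p = t then 1 else 0)
                + (if p = PySem.Str.slice t none (some 2) then 1 else 0), some t)
      else st)
    (0, none)).1

-- ===== PRECONDITION & SPEC =====
def Spec_count_redundant (tokens : List String) (out : Int) : Prop := out = count_redundant_alt tokens
instance (tokens : List String) (out : Int) : Decidable (Spec_count_redundant tokens out) := by unfold Spec_count_redundant; infer_instance

-- ===== CLAIM (what is proved, stated in full; the proofs are below) =====
def Claim_equal_count_redundant : Prop := ∀ (tokens : List String), Dom_count_redundant tokens → Spec_count_redundant tokens (count_redundant tokens)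

-- ===== LEMMAS AND PROOFS =====

/-- the accepted-token test both programs perform -/
def isPDPU (t : String) : Bool :=
  decide (2 ≤ PySem.Str.len t ∧
    (PySem.Str.slice t none (some 2) = "PD" ∨ PySem.Str.slice t none (some 2) = "PU"))

/-- A's loop body for one adjacent pair (a = pdpu[i], b = pdpu[i+1]) -/
def step2 (a b : String) (rc : Int) : Int :=
  if a = PySem.Str.slice b none (some 2) then (if a = b then rc + 1 else rc) + 1
  else (if a = b then rc + 1 else rc)

/-- weight contributed by an adjacent accepted pair (prev, cur) -/
def wgt (p t : String) : Int :=
  (if p = t then 1 else 0) + (if p = PySem.Str.slice t none (some 2) then 1 else 0)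

/-- the adjacent-pair count as structural recursion -/
def adjCount : List String → Int
  | [] => 0
  | [_] => 0
  | x :: y :: rest => wgt x y + adjCount (y :: rest)

lemma filterA (l : List String) (acc : List String) :
    l.foldl
      (fun pdpu t =>
        if 2 ≤ PySem.Str.len t then
          if PySem.Str.slice t none (some 2) = "PD" ∨ PySem.Str.slice t none (some 2) = "PU" then
            pdpu ++ [t]
          else pdpu
        else pdpu) acc = acc ++ l.filter isPDPU := by
  induction l generalizing acc with
  | nil => simp
  | cons t rest ih =>
    simp only [List.foldl_cons, List.filter_cons]
    by_cases h1 : 2 ≤ PySem.Str.len t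
    · by_cases h2 : PySem.Str.slice t none (some 2) = "PD" ∨ PySem.Str.slice t none (some 2) = "PU"
      · have hb : isPDPU t = true := by unfold isPDPU; exact decide_eq_true ⟨h1, h2⟩
        rw [if_pos h1, if_pos h2, ih]
        simp [hb]
      · have hb : isPDPU t = false := by
          unfold isPDPU; exact decide_eq_false (fun hc => h2 hc.2)
        rw [if_pos h1, if_neg h2, ih]
        simp [hb]
    · have hb : isPDPU t = false := by
        unfold isPDPU; exact decide_eq_false (fun hc => h1 hc.1)
      rw [if_neg h1, ih]
      simp [hb]

lemma toNat_sub_one (n : Nat) : ((n : Int) - 1).toNat = n - 1 := by omega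

lemma loopA (l : List String) (init : Int) :
    (List.range (l.length - 1)).foldl
      (fun rc k => step2 (l.getD k "") (l.getD (k + 1) "") rc) init
    = init + adjCount l := by
  induction l generalizing init with
  | nil => simp [adjCount]
  | cons x ys ih =>
    cases ys with
    | nil => simp [adjCount]
    | cons y rest =>
      have hlen : (x :: y :: rest).length - 1 = (y :: rest).length - 1 + 1 := by
        simp [List.length_cons]
      rw [hlen, List.range_succ_eq_map, List.foldl_cons, List.foldl_map]
      simp only [List.getD_cons_zero, List.getD_cons_succ, Nat.succ_eq_add_one] at ih ⊢
      rw [ih]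
      simp only [adjCount, step2, wgt]
      by_cases h1 : x = y <;>
        by_cases h2 : x = PySem.Str.slice y none (some 2) <;> simp [h1, h2] <;>
          split_ifs <;> ring

lemma countA (tokens : List String) :
    count_redundant tokens = adjCount (tokens.filter isPDPU) := by
  have h1 : pdpuA tokens = tokens.filter isPDPU := by
    unfold pdpuA
    rw [PySem.List.foldl_pyRange_zero_pyGetD' tokens ""
      (fun pdpu t =>
        if 2 ≤ PySem.Str.len t then
          if PySem.Str.slice t none (some 2) = "PD" ∨ PySem.Str.slice t none (some 2) = "PU" then
            pdpu ++ [t]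
          else pdpu
        else pdpu) [], filterA, List.nil_append]
  unfold count_redundant
  rw [h1]
  set l := tokens.filter isPDPU with hl
  rw [PySem.List.pyRange_one, List.foldl_map, sub_zero, toNat_sub_one]
  have hfun : (fun (rc : Int) (k : Nat) =>
      if PySem.List.pyGetD l (0 + (k : Int)) "" =
          PySem.Str.slice (PySem.List.pyGetD l (0 + (k : Int) + 1) "") none (some 2) then
        (if PySem.List.pyGetD l (0 + (k : Int)) "" = PySem.List.pyGetD l (0 + (k : Int) + 1) ""
          then rc + 1 else rc) + 1
      else
        (if PySem.List.pyGetD l (0 + (k : Int)) "" = PySem.List.pyGetD l (0 + (k : Int) + 1) ""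
          then rc + 1 else rc))
      = (fun rc k => step2 (l.getD k "") (l.getD (k + 1) "") rc) := by
    funext rc k
    simp only [zero_add, ← Nat.cast_add_one, PySem.List.pyGetD_natCast, step2]
  rw [hfun, loopA]
  simp

lemma countB (l : List String) (rc : Int) (p : Option String) :
    (l.foldl
      (fun (st : Int × Option String) t =>
        if 2 ≤ PySem.Str.len t ∧
            (PySem.Str.slice t none (some 2) = "PD" ∨ PySem.Str.slice t none (some 2) = "PU") then
          match st.2 with
          | none => (st.1, some t)
          | some p =>
            (st.1 + (if p = t then 1 else 0)
                  + (if p = PySem.Str.slice t none (some 2) then 1 else 0), some t)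
        else st)
      (rc, p)).1 = rc + adjCount (p.toList ++ l.filter isPDPU) := by
  induction l generalizing rc p with
  | nil => cases p <;> simp [adjCount]
  | cons t rest ih =>
    simp only [List.foldl_cons, List.filter_cons]
    by_cases h : 2 ≤ PySem.Str.len t ∧
        (PySem.Str.slice t none (some 2) = "PD" ∨ PySem.Str.slice t none (some 2) = "PU")
    · have hb : isPDPU t = true := by unfold isPDPU; exact decide_eq_true h
      rw [if_pos h]
      cases p with
      | none =>
        simp only [ih, hb]
        simp
      | some x =>
        simp only [ih, hb]
        simp [adjCount, wgt]
        ring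
    · have hb : isPDPU t = false := by unfold isPDPU; exact decide_eq_false h
      rw [if_neg h]
      cases p <;> simp only [ih, hb] <;> simp

-- ===== VERDICT (by name: the statement is the Claim_ definition above) =====
theorem count_redundant_spec : Claim_equal_count_redundant := by
  intro tokens _
  unfold Spec_count_redundant count_redundant_alt
  rw [countB tokens 0 none, countA]
  simp
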